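-- pv_equiv track=rewrite | github.com/shashikanth888/journeyThroughRadiations | lowTechRadiationExpoWithStories.py | shiftAsciiToRight
-- ===== SOURCE A (Python) =====
-- def shiftAsciiToRight(asciiArt, noSpaces):
--     """
--     Receives ascii art as string.
--     Right shifts each line of ascii art by noSpaces
--     Returns right shifted ascii art
--     """
--     ret = ""
--     asciiArt = asciiArt.rstrip('\n')
--     for line in asciiArt.split('\n'):
--         ret += " " * noSpaces
--         ret += line
--         ret += "\n"
--     ret = ret.rstrip('\n') # to get rid of the extra new line in the end
--     return ret
-- ===== SOURCE B (Python) =====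
-- def shiftAsciiToRight(asciiArt, noSpaces):
--     """
--     Receives ascii art as string.
--     Right shifts each line of ascii art by noSpaces
--     Returns right shifted ascii art
--     """
--     prefix = " " * noSpaces
--     body = asciiArt.rstrip("\n")
--     return prefix + body.replace("\n", "\n" + prefix)
-- ===== Notes on version B (the rewrite author's own statement) =====
-- stated objective: simpler
-- what changed: Replaces the split-into-lines loop with growing-string accumulator and trailing-newline cleanup by a single str.replace that inserts the precomputed prefix after each newline, plus one prefix at the front; no line list, no loop, no final rstrip.
import Mathlib
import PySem

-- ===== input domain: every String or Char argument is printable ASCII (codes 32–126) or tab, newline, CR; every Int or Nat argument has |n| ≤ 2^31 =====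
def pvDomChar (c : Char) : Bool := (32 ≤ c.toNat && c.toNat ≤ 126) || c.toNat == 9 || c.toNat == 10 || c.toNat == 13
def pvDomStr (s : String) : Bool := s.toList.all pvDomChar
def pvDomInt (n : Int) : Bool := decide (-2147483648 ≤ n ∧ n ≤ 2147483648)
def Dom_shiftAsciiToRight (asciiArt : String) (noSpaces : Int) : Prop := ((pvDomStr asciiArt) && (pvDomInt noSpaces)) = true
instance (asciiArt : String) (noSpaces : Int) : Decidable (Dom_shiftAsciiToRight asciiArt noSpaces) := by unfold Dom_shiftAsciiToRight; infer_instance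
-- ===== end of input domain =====

-- B drops A's per-line loop, growing accumulator and final rstrip in favour of one
-- str.replace inserting the precomputed prefix after every newline (objective: simpler).

-- shared helper: exact port of Python's s.rstrip('\n') — drop trailing '\n' characters
-- (PySem.Chars.stripChars strips both sides, so this one-sided form is ported by hand; exact)
def pyRstripNl (s : List Char) : List Char := (List.dropWhile (· == '\n') s.reverse).reverse

-- ===== PORT A =====
def shiftAsciiToRight (asciiArt : String) (noSpaces : Int) : String :=
  let art := pyRstripNl asciiArt.toList                  -- asciiArt = asciiArt.rstrip('\n')
  let ret :=                                             -- for line in asciiArt.split('\n'): ret += …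
    (PySem.Chars.splitOn art ['\n']).foldl
      (fun ret line => ret ++ PySem.List.pyRepeat [' '] noSpaces ++ line ++ ['\n']) []
  String.ofList (pyRstripNl ret)                         -- ret = ret.rstrip('\n')

-- ===== PORT B =====
def shiftAsciiToRight_alt (asciiArt : String) (noSpaces : Int) : String :=
  let pfx := PySem.List.pyRepeat [' '] noSpaces          -- prefix = " " * noSpaces
  let body := pyRstripNl asciiArt.toList                 -- body = asciiArt.rstrip("\n")
  String.ofList (pfx ++ PySem.Chars.replace body ['\n'] ('\n' :: pfx))

-- ===== PRECONDITION & SPEC =====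
def Spec_shiftAsciiToRight (asciiArt : String) (noSpaces : Int) (out : String) : Prop := out = shiftAsciiToRight_alt asciiArt noSpaces
instance (asciiArt : String) (noSpaces : Int) (out : String) : Decidable (Spec_shiftAsciiToRight asciiArt noSpaces out) := by unfold Spec_shiftAsciiToRight; infer_instance

-- ===== CLAIM (what is proved, stated in full; the proofs are below) =====
def Claim_equal_shiftAsciiToRight : Prop := ∀ (asciiArt : String) (noSpaces : Int), Dom_shiftAsciiToRight asciiArt noSpaces → Spec_shiftAsciiToRight asciiArt noSpaces (shiftAsciiToRight asciiArt noSpaces)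

-- ===== LEMMAS AND PROOFS =====

-- canonical split of a char list at every '\n'
def splitNl : List Char → List (List Char)
  | [] => [[]]
  | c :: t => if c = '\n' then [] :: splitNl t else (splitNl t).modifyHead (c :: ·)

-- canonical join with a separator
def joinNl (sep : List Char) : List (List Char) → List Char
  | [] => []
  | [x] => x
  | x :: y :: tl => x ++ sep ++ joinNl sep (y :: tl)

lemma splitNl_cons (c : Char) (t : List Char) :
    splitNl (c :: t) = if c = '\n' then [] :: splitNl t else (splitNl t).modifyHead (c :: ·) := rfl

lemma splitNl_ne_nil (s : List Char) : splitNl s ≠ [] := by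
  induction s with
  | nil => simp [splitNl]
  | cons c t ih =>
    rw [splitNl_cons]
    split_ifs
    · simp
    · cases h : splitNl t with
      | nil => exact absurd h ih
      | cons x ls => simp [List.modifyHead_cons]

lemma mem_splitNl_no_nl (s : List Char) : ∀ l ∈ splitNl s, '\n' ∉ l := by
  induction s with
  | nil => intro l hl; simp [splitNl] at hl; simp [hl]
  | cons c t ih =>
    intro l hl
    rw [splitNl_cons] at hl
    by_cases hc : c = '\n'
    · rw [if_pos hc] at hl
      rcases List.mem_cons.mp hl with rfl | hl
      · simp
      · exact ih l hl
    · rw [if_neg hc] at hl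
      cases h : splitNl t with
      | nil => exact absurd h (splitNl_ne_nil t)
      | cons x ls =>
        rw [h, List.modifyHead_cons] at hl
        rcases List.mem_cons.mp hl with rfl | hl
        · intro hmem
          rcases List.mem_cons.mp hmem with h1 | h1
          · exact hc h1.symm
          · exact ih x (h ▸ List.mem_cons_self) h1
        · exact ih l (h ▸ List.mem_cons_of_mem x hl)

lemma getLast?_splitNl (s : List Char) (hs : s ≠ []) (h : s.getLast? ≠ some '\n') :
    (splitNl s).getLast? ≠ some [] := by
  induction s with
  | nil => exact absurd rfl hs
  | cons c t ih =>
    rcases t with _ | ⟨d, t'⟩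
    · have hc : c ≠ '\n' := by simpa using h
      rw [splitNl_cons, if_neg hc]
      simp [splitNl, List.modifyHead_cons]
    · have h' : (d :: t').getLast? ≠ some '\n' := by
        simpa [List.getLast?_cons_cons] using h
      have ih' := ih (by simp) h'
      rw [splitNl_cons]
      cases hh : splitNl (d :: t') with
      | nil => exact absurd hh (splitNl_ne_nil _)
      | cons x ls =>
        rw [hh] at ih'
        split_ifs
        · simpa [List.getLast?_cons_cons] using ih'
        · rcases ls with _ | ⟨y, ls'⟩
          · simp [List.modifyHead_cons]
          · rw [List.modifyHead_cons]
            simpa [List.getLast?_cons_cons] using ih'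

lemma dropWhile_of_no_nl (v : List Char) (h : '\n' ∉ v) :
    List.dropWhile (· == '\n') v = v := by
  cases v with
  | nil => rfl
  | cons c t =>
    have hc : c ≠ '\n' := fun e => h (e ▸ List.mem_cons_self)
    simp [hc]

lemma rstripNl_append_newline (u : List Char) (h : '\n' ∉ u) :
    pyRstripNl (u ++ ['\n']) = u := by
  have hrev : '\n' ∉ u.reverse := by simpa using h
  simp [pyRstripNl, dropWhile_of_no_nl _ hrev]

lemma rstripNl_append_left (u v : List Char) (h : pyRstripNl v ≠ []) :
    pyRstripNl (u ++ v) = u ++ pyRstripNl v := by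
  have hne : List.dropWhile (· == '\n') v.reverse ≠ [] := by
    intro hnil; apply h; simp [pyRstripNl, hnil]
  simp [pyRstripNl, List.dropWhile_append, List.isEmpty_iff, hne]

-- splitOn.go with separator ['\n'] computes splitNl
lemma splitOn_go_spec (fuel : Nat) (l cur : List Char) (acc : List (List Char))
    (hf : l.length ≤ fuel) :
    PySem.Chars.splitOn.go ['\n'] fuel l cur acc
      = acc.reverse ++ (splitNl l).modifyHead (cur.reverse ++ ·) := by
  induction fuel generalizing l cur acc with
  | zero =>
    have : l = [] := by simpa using hf
    subst this
    simp [PySem.Chars.splitOn.go, splitNl, List.modifyHead_cons]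
  | succ fuel ih =>
    cases l with
    | nil => simp [PySem.Chars.splitOn.go, splitNl, List.modifyHead_cons]
    | cons c t =>
      have ht : t.length ≤ fuel := by simpa using hf
      by_cases hc : c = '\n'
      · subst hc
        have hpre : List.isPrefixOf ['\n'] ('\n' :: t) = true := by simp [List.isPrefixOf]
        simp only [PySem.Chars.splitOn.go, hpre, if_true, List.length_cons, List.drop_succ_cons,
          List.length_nil, List.drop_zero]
        rw [ih t [] (cur.reverse :: acc) ht, splitNl_cons, if_pos rfl]
        cases h : splitNl t with
        | nil => exact absurd h (splitNl_ne_nil t)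
        | cons x ls => simp [List.modifyHead_cons]
      · have hpre : List.isPrefixOf ['\n'] (c :: t) = false := by
          simp [List.isPrefixOf]; exact fun e => hc e.symm
        simp only [PySem.Chars.splitOn.go, hpre, Bool.false_eq_true, if_false]
        rw [ih t (c :: cur) acc ht, splitNl_cons, if_neg hc]
        cases h : splitNl t with
        | nil => exact absurd h (splitNl_ne_nil t)
        | cons x ls => simp [List.modifyHead_cons]

lemma splitOn_eq_splitNl (s : List Char) :
    PySem.Chars.splitOn s ['\n'] = splitNl s := by
  rw [PySem.Chars.splitOn, splitOn_go_spec (s.length + 1) s [] [] (by omega)]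
  cases h : splitNl s with
  | nil => exact absurd h (splitNl_ne_nil s)
  | cons x ls => simp [List.modifyHead_cons]

-- replace.go with old = ['\n'] computes join-of-split
lemma replace_go_spec (new : List Char) (fuel : Nat) (l acc : List Char)
    (hf : l.length ≤ fuel) :
    PySem.Chars.replace.go ['\n'] new fuel l acc
      = acc.reverse ++ joinNl new (splitNl l) := by
  induction fuel generalizing l acc with
  | zero =>
    have : l = [] := by simpa using hf
    subst this
    simp [PySem.Chars.replace.go, splitNl, joinNl]
  | succ fuel ih =>
    cases l with
    | nil => simp [PySem.Chars.replace.go, splitNl, joinNl]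
    | cons c t =>
      have ht : t.length ≤ fuel := by simpa using hf
      by_cases hc : c = '\n'
      · subst hc
        have hpre : List.isPrefixOf ['\n'] ('\n' :: t) = true := by simp [List.isPrefixOf]
        simp only [PySem.Chars.replace.go, hpre, if_true, List.length_cons, List.drop_succ_cons,
          List.length_nil, List.drop_zero]
        rw [ih t (new.reverse ++ acc) ht, splitNl_cons, if_pos rfl]
        cases h : splitNl t with
        | nil => exact absurd h (splitNl_ne_nil t)
        | cons x ls => simp [joinNl]
      · have hpre : List.isPrefixOf ['\n'] (c :: t) = false := by
          simp [List.isPrefixOf]; exact fun e => hc e.symm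
        simp only [PySem.Chars.replace.go, hpre, Bool.false_eq_true, if_false]
        rw [ih t (c :: acc) ht, splitNl_cons, if_neg hc]
        cases h : splitNl t with
        | nil => exact absurd h (splitNl_ne_nil t)
        | cons x ls => cases ls <;> simp [joinNl]

lemma replace_eq_joinNl (s new : List Char) :
    PySem.Chars.replace s ['\n'] new = joinNl new (splitNl s) := by
  rw [PySem.Chars.replace]
  simp only [List.isEmpty_cons, Bool.false_eq_true, if_false]
  exact replace_go_spec new s.length s [] le_rfl

lemma joinNl_cons_cons_ne_nil (pre x y : List Char) (tl : List (List Char)) :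
    joinNl ('\n' :: pre) (x :: y :: tl) ≠ [] := by
  simp [joinNl]

-- the heart: stripping the trailing '\n' from A's accumulated string gives B's string
lemma main_lemma (pre : List Char) (hpre : '\n' ∉ pre) :
    ∀ ls : List (List Char), ls ≠ [] → (∀ l ∈ ls, '\n' ∉ l) →
      (1 < ls.length → ls.getLast? ≠ some []) →
      pyRstripNl (ls.flatMap (fun l => pre ++ l ++ ['\n']))
        = pre ++ joinNl ('\n' :: pre) ls := by
  intro ls
  induction ls with
  | nil => intro h; exact absurd rfl h
  | cons x tl ih =>
    intro _ hnl hlast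
    rcases tl with _ | ⟨y, tl'⟩
    · have hx : '\n' ∉ x := hnl x List.mem_cons_self
      have hux : '\n' ∉ pre ++ x := by
        intro hm; rcases List.mem_append.mp hm with h1 | h1
        · exact hpre h1
        · exact hx h1
      simp only [List.flatMap_cons, List.flatMap_nil, List.append_nil, joinNl]
      rw [show pre ++ x ++ ['\n'] = (pre ++ x) ++ ['\n'] by simp,
        rstripNl_append_newline _ hux]
    · have hy : y :: tl' ≠ [] := by simp
      have hnl' : ∀ l ∈ y :: tl', '\n' ∉ l := fun l hl => hnl l (List.mem_cons_of_mem x hl)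
      have hlast' : 1 < (y :: tl').length → (y :: tl').getLast? ≠ some [] := by
        intro hlen
        have := hlast (by simp)
        simpa [List.getLast?_cons_cons] using this
      have ihr := ih hy hnl' hlast'
      have hne : pyRstripNl ((y :: tl').flatMap (fun l => pre ++ l ++ ['\n'])) ≠ [] := by
        rw [ihr]
        rcases tl' with _ | ⟨z, tl''⟩
        · have hyne : y ≠ [] := by
            intro hy0
            exact hlast (by simp) (by simp [hy0, List.getLast?_cons_cons])
          simp only [joinNl]
          intro hcontra
          rcases List.append_eq_nil_iff.mp hcontra with ⟨_, h2⟩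
          exact hyne h2
        · intro hcontra
          rcases List.append_eq_nil_iff.mp hcontra with ⟨_, h2⟩
          exact joinNl_cons_cons_ne_nil pre y z tl'' h2
      calc pyRstripNl ((x :: y :: tl').flatMap (fun l => pre ++ l ++ ['\n']))
          = pyRstripNl ((pre ++ x ++ ['\n']) ++ (y :: tl').flatMap (fun l => pre ++ l ++ ['\n'])) := by
            simp [List.flatMap_cons]
        _ = (pre ++ x ++ ['\n']) ++ pyRstripNl ((y :: tl').flatMap (fun l => pre ++ l ++ ['\n'])) :=
            rstripNl_append_left _ _ hne
        _ = pre ++ joinNl ('\n' :: pre) (x :: y :: tl') := by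
            rw [ihr]; simp [joinNl]

lemma rstripNl_getLast (s : List Char) : (pyRstripNl s).getLast? ≠ some '\n' := by
  rw [pyRstripNl]
  intro h
  cases hd : List.dropWhile (· == '\n') s.reverse with
  | nil => rw [hd] at h; simp at h
  | cons c t =>
    rw [hd, List.getLast?_reverse] at h
    have hc : c = '\n' := by simpa using h
    have hh := List.head?_dropWhile_not (p := (· == '\n')) (l := s.reverse)
    rw [hd] at hh
    simp [hc] at hh

-- ===== VERDICT (by name: the statement is the Claim_ definition above) =====
theorem shiftAsciiToRight_spec : Claim_equal_shiftAsciiToRight := by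
  intro asciiArt noSpaces _
  unfold Spec_shiftAsciiToRight shiftAsciiToRight shiftAsciiToRight_alt
  set pre := PySem.List.pyRepeat [' '] noSpaces with hpredef
  have hpre : '\n' ∉ pre := by
    rw [hpredef, PySem.List.pyRepeat_singleton]
    intro hm
    exact absurd (List.mem_replicate.mp hm).2 (by decide)
  set art := pyRstripNl asciiArt.toList with hartdef
  simp only []
  rw [replace_eq_joinNl, splitOn_eq_splitNl]
  have hfold : (splitNl art).foldl
      (fun ret line => ret ++ PySem.List.pyRepeat [' '] noSpaces ++ line ++ ['\n']) ([] : List Char)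
      = (splitNl art).flatMap (fun l => pre ++ l ++ ['\n']) := by
    rw [show (fun (ret line : List Char) => ret ++ PySem.List.pyRepeat [' '] noSpaces ++ line ++ ['\n'])
        = (fun ret line => ret ++ (pre ++ line ++ ['\n'])) by
      funext ret line; rw [← hpredef]; simp]
    rw [PySem.List.foldl_append_eq_flatMap]
    simp
  rw [hfold]
  congr 1
  rcases hart : art with _ | ⟨c, t⟩
  · -- empty stripped art: both sides reduce to pre
    rw [show splitNl [] = [[]] from rfl]
    simp only [List.flatMap_cons, List.flatMap_nil, List.append_nil, joinNl]
    rw [rstripNl_append_newline pre hpre]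
  · exact main_lemma pre hpre (splitNl (c :: t)) (splitNl_ne_nil _)
      (mem_splitNl_no_nl _)
      (fun _ => getLast?_splitNl (c :: t) (by simp) (hart ▸ rstripNl_getLast asciiArt.toList))
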